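-- pv_equiv track=rewrite | github.com/advaithasabnis/advent-of-code | advent_of_code/year2020/day05/shared.py | get_column_id
-- ===== SOURCE A (Python) =====
-- import math
--
-- def get_column_id(text: str) -> int:
--     min_column = 0
--     max_column = 7
--     for char in text[7:10]:
--         if char == "L":
--             max_column = math.floor((min_column + max_column) / 2)
--         elif char == "R":
--             min_column = math.ceil((min_column + max_column) / 2)
--         else:
--             raise ValueError("Expected R or L")
--     assert min_column == max_column
--     return min_column
-- ===== SOURCE B (Python) =====
-- def get_column_id(text: str) -> int:
--     seat = text[7:10]
--     value = 0
--     for char in seat: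
--         value *= 2
--         if char == "R":
--             value += 1
--         elif char != "L":
--             raise ValueError("Expected R or L")
--     assert len(seat) == 3
--     return value
-- ===== Notes on version B (the rewrite author's own statement) =====
-- stated objective: simpler
-- what changed: Replaces the converging min/max interval bisection with a single positional binary accumulator (value = value*2 + (char=='R')).
import Mathlib
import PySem

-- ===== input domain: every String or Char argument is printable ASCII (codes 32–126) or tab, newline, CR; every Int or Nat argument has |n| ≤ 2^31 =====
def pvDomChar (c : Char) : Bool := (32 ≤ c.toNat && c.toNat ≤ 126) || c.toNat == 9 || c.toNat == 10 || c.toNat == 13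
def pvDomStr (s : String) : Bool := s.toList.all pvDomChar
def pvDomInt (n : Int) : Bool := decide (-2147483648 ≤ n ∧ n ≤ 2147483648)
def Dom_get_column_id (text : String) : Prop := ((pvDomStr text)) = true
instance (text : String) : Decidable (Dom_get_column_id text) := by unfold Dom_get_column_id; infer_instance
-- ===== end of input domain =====

-- B replaces A's converging min/max interval bisection by a positional binary accumulator; objective: simpler.


-- ===== PORT A =====
-- one loop step over (min_column, max_column); the 'else raise' branch is excluded by Pre_, state left unchanged there.
-- math.floor((a+b)/2) = floordiv (a+b) 2 and math.ceil((a+b)/2) = floordiv (a+b+1) 2, exact on these small ints.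
def stepA (st : Int × Int) (c : Char) : Int × Int :=
  if c = 'L' then (st.1, PySem.Int.floordiv (st.1 + st.2) 2)
  else if c = 'R' then (PySem.Int.floordiv (st.1 + st.2 + 1) 2, st.2)
  else st

def get_column_id (text : String) : Int :=
  ((PySem.Str.slice text (some 7) (some 10)).toList.foldl stepA (0, 7)).1

-- ===== PORT B =====
def stepB (v : Int) (c : Char) : Int :=
  v * 2 + (if c = 'R' then 1 else 0)

def get_column_id_alt (text : String) : Int :=
  (PySem.Str.slice text (some 7) (some 10)).toList.foldl stepB 0

-- ===== PRECONDITION & SPEC =====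
-- Pre_ excludes exactly the inputs where A raises: slices shorter than 3 (AssertionError) or containing a char other than 'L'/'R' (ValueError).
def Pre_get_column_id (text : String) : Prop :=
  ((text.toList.drop 7).take 3).length = 3 ∧
  (((text.toList.drop 7).take 3).all fun c => c == 'L' || c == 'R') = true
instance (text : String) : Decidable (Pre_get_column_id text) := by unfold Pre_get_column_id; infer_instance

def pvWitness_get_column_id : String := "abcdefgRLR"

def Spec_get_column_id (text : String) (out : Int) : Prop := out = get_column_id_alt text
instance (text : String) (out : Int) : Decidable (Spec_get_column_id text out) := by unfold Spec_get_column_id; infer_instance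

-- ===== CLAIM (what is proved, stated in full; the proofs are below) =====
def Claim_equal_get_column_id : Prop := ∀ (text : String), Dom_get_column_id text → Pre_get_column_id text → Spec_get_column_id text (get_column_id text)

-- ===== LEMMAS AND PROOFS =====
theorem slice_toList (text : String) :
    (PySem.Str.slice text (some 7) (some 10)).toList = (text.toList.drop 7).take 3 := by
  have := PySem.Str.toList_slice text (some 7) (some 10)
  rw [this]
  have : PySem.List.slice text.toList (some (7:Int)) (some (10:Int)) = (text.toList.drop 7).take 3 := by
    have h := PySem.List.slice_natCast text.toList 7 10
    simpa using h
  simpa using this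

theorem core (l : List Char) (hlen : l.length = 3) (hc : ∀ c ∈ l, c = 'L' ∨ c = 'R') :
    (l.foldl stepA (0, 7)).1 = l.foldl stepB 0 := by
  match l, hlen with
  | [a, b, c], _ =>
    have ha := hc a (by simp)
    have hb := hc b (by simp)
    have hcc := hc c (by simp)
    rcases ha with rfl | rfl <;> rcases hb with rfl | rfl <;> rcases hcc with rfl | rfl <;> decide

-- ===== VERDICT (by name: the statement is the Claim_ definition above) =====
theorem get_column_id_spec : Claim_equal_get_column_id := by
  intro text _ hpre
  unfold Spec_get_column_id get_column_id get_column_id_alt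
  rw [slice_toList]
  refine core _ hpre.1 ?_
  intro c hc
  have := List.all_eq_true.mp hpre.2 c hc
  simpa using this
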